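-- pv_equiv track=rewrite | github.com/flyliu2017/mask_comments | data_process/extract_phrase.py | aligns_to_dicts
-- ===== SOURCE A (Python) =====
-- def aligns_to_dicts(aligns):
--     aligns = [s.strip().split(' ') for s in aligns]
--     aligns = [[s.split('-') for s in l] for l in aligns]
--
--     en_zh_dict = []
--     zh_en_dict = []
--
--     for l in aligns:
--         z2e = dict()
--         e2z = dict()
--         if l != [[""]]:
--             for n in l:
--                 if n[0]:
--                     zh = int(n[0])
--                     en = int(n[1])
--                     z2e[zh] = z2e.get(zh, set())
--                     z2e[zh].add(en)
--                     e2z[en] = e2z.get(en, set())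
--                     e2z[en].add(zh)
--
--         en_zh_dict.append(e2z)
--         zh_en_dict.append(z2e)
--
--     return zh_en_dict, en_zh_dict
-- ===== SOURCE B (Python) =====
-- def aligns_to_dicts(aligns):
--     # Parse each line into a flat list of (zh, en) pairs by comprehensions,
--     # then build each mapping non-incrementally: a dict comprehension over the
--     # first-occurrence-deduplicated keys, each value a set comprehension that
--     # filters the pair list for that key.
--     all_pairs = [
--         [(int(p[0]), int(p[1]))
--          for p in (t.split('-') for t in s.strip().split(' '))
--          if p[0]]
--         for s in aligns
--     ]
--
--     def grouped(pairs):
--         keys = list(dict.fromkeys(k for k, _ in pairs))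
--         return {k: {v for kk, v in pairs if kk == k} for k in keys}
--
--     zh_en_dict = [grouped(ps) for ps in all_pairs]
--     en_zh_dict = [grouped([(e, z) for z, e in ps]) for ps in all_pairs]
--     return zh_en_dict, en_zh_dict
-- ===== Notes on version B (the rewrite author's own statement) =====
-- stated objective: alternative
-- what changed: A builds both dicts incrementally, mutating dicts of sets token by token inside one loop; B first parses each line into a pair list with comprehensions and then constructs each mapping non-incrementally as a dict comprehension over the first-occurrence-deduplicated keys, collecting each value set by filtering the pair list per key (no dict/set mutation at all).
import Mathlib
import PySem

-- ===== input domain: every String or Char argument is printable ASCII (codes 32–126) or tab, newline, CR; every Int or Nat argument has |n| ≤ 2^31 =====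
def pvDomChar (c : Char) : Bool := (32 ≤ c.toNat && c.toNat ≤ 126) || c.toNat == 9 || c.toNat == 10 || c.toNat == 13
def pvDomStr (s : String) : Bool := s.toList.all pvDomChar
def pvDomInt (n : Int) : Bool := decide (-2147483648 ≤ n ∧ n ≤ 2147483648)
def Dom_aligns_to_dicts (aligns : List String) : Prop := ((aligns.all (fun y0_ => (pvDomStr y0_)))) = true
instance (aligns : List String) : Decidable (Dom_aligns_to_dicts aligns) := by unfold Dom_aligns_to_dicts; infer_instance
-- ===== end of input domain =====

-- B replaces A's single token loop that mutates two dicts of sets with a parse-then-group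
-- scheme: each line becomes a pair list, and each mapping is built non-incrementally as a
-- map over the first-occurrence-deduplicated keys, filtering the pair list per key; objective: alternative.

-- ===== PORT A =====
-- token step of A's inner loop: n is one token already split on '-';
-- int(n[0]) / int(n[1]) are total via '.getD' — Pre_ guarantees the Options are some
def pvStepA (d : PySem.Dict Int (PySem.Set Int) × PySem.Dict Int (PySem.Set Int))
    (n : List String) : PySem.Dict Int (PySem.Set Int) × PySem.Dict Int (PySem.Set Int) :=
  if n.headD "" ≠ "" then  -- 'if n[0]:' (n is nonempty: split never returns [])
    let zh := (PySem.Int.ofStr? (n.headD "")).getD 0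
    let en := (PySem.Int.ofStr? ((PySem.List.pyGet? n 1).getD "")).getD 0
    -- z2e[zh] = z2e.get(zh, set()); z2e[zh].add(en)  (and the same for e2z): overwrite with the grown set
    (d.1.insert zh (PySem.Set.add (d.1.getD zh PySem.Set.empty) en),
     d.2.insert en (PySem.Set.add (d.2.getD en PySem.Set.empty) zh))
  else d

-- one line of A's outer loop: builds (z2e, e2z)
def pvLineA (l : List (List String)) :
    PySem.Dict Int (PySem.Set Int) × PySem.Dict Int (PySem.Set Int) :=
  if l ≠ [[""]] then l.foldl pvStepA (PySem.Dict.empty, PySem.Dict.empty)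
  else (PySem.Dict.empty, PySem.Dict.empty)

def aligns_to_dicts (aligns : List String) :
    (List (List (Int × List Int))) × (List (List (Int × List Int))) :=
  -- the separators ' ' and '-' are nonempty literals, so split? is always some and '.getD []' is never the default
  let aligns1 := aligns.map (fun s => (PySem.Str.split? (PySem.Str.strip s) " ").getD [])
  let aligns2 := aligns1.map (fun l => l.map (fun s => (PySem.Str.split? s "-").getD []))
  let p := aligns2.foldl
    (fun (acc : List (PySem.Dict Int (PySem.Set Int)) × List (PySem.Dict Int (PySem.Set Int))) l =>
      let zd := pvLineA l
      (acc.1 ++ [zd.2], acc.2 ++ [zd.1]))   -- en_zh_dict.append(e2z); zh_en_dict.append(z2e)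
    ([], [])
  -- dicts of sets cross the return boundary as association lists (type convention): '.items'
  (p.2.map PySem.Dict.items, p.1.map PySem.Dict.items)

-- ===== PORT B =====
-- the per-line list comprehension: split tokens, keep those with nonempty first part, convert
def pvPairsOf (s : String) : List (Int × Int) :=
  (((((PySem.Str.split? (PySem.Str.strip s) " ").getD []).map
      (fun t => (PySem.Str.split? t "-").getD [])).filter
      (fun p => p.headD "" ≠ "")).map
    (fun p => ((PySem.Int.ofStr? (p.headD "")).getD 0,
               (PySem.Int.ofStr? ((PySem.List.pyGet? p 1).getD "")).getD 0)))

-- grouped(pairs): dict comprehension over dict.fromkeys of the keys; each value a set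
-- comprehension filtering the pair list for that key ({v for …} = Set.ofList of the filtered values)
def pvGrouped (pairs : List (Int × Int)) : List (Int × List Int) :=
  (PySem.List.dedup (pairs.map (fun kv => kv.1))).map
    (fun k => (k, (PySem.Set.ofList ((pairs.filter (fun kv => kv.1 == k)).map (fun kv => kv.2)) : PySem.Set Int)))

def aligns_to_dicts_alt (aligns : List String) :
    (List (List (Int × List Int))) × (List (List (Int × List Int))) :=
  let allPairs := aligns.map pvPairsOf
  (allPairs.map pvGrouped,
   allPairs.map (fun ps => pvGrouped (ps.map (fun ze => (ze.2, ze.1)))))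

-- ===== PRECONDITION & SPEC =====
-- exactly where Python A returns: every token with a nonempty part before the first '-'
-- must have an int-parsable first part, a second part (else IndexError), and an int-parsable second part
def Pre_aligns_to_dicts (aligns : List String) : Prop :=
  ∀ s ∈ aligns, ∀ tok ∈ (PySem.Str.split? (PySem.Str.strip s) " ").getD [],
    ((PySem.Str.split? tok "-").getD []).headD "" ≠ "" →
      (PySem.Int.ofStr? (((PySem.Str.split? tok "-").getD []).headD "")).isSome ∧
      (PySem.List.pyGet? ((PySem.Str.split? tok "-").getD []) 1).isSome ∧
      (PySem.Int.ofStr? ((PySem.List.pyGet? ((PySem.Str.split? tok "-").getD []) 1).getD "")).isSome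
instance (aligns : List String) : Decidable (Pre_aligns_to_dicts aligns) := by
  unfold Pre_aligns_to_dicts; infer_instance

def pvWitness_aligns_to_dicts : List String := ["1-2 3-2", "", "0-0 -5 1-2-7"]

def Spec_aligns_to_dicts (aligns : List String)
    (out : (List (List (Int × List Int))) × (List (List (Int × List Int)))) : Prop :=
  out = aligns_to_dicts_alt aligns
instance (aligns : List String) (out : (List (List (Int × List Int))) × (List (List (Int × List Int)))) :
    Decidable (Spec_aligns_to_dicts aligns out) := by unfold Spec_aligns_to_dicts; infer_instance

-- ===== CLAIM (what is proved, stated in full; the proofs are below) =====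
def Claim_equal_aligns_to_dicts : Prop := ∀ (aligns : List String), Dom_aligns_to_dicts aligns → Pre_aligns_to_dicts aligns → Spec_aligns_to_dicts aligns (aligns_to_dicts aligns)

-- ===== LEMMAS AND PROOFS =====

-- the test and the parsed pair of one token, as shared vocabulary for both ports
def pvTokOk (tok : String) : Bool :=
  ((PySem.Str.split? tok "-").getD []).headD "" ≠ ""

def pvTokPair (tok : String) : Int × Int :=
  ((PySem.Int.ofStr? (((PySem.Str.split? tok "-").getD []).headD "")).getD 0,
   (PySem.Int.ofStr? ((PySem.List.pyGet? ((PySem.Str.split? tok "-").getD []) 1).getD "")).getD 0)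

-- B's comprehension equals filter-by-token then parse
lemma pvPairsOf_eq (s : String) :
    pvPairsOf s
      = ((((PySem.Str.split? (PySem.Str.strip s) " ").getD []).filter pvTokOk).map pvTokPair) := by
  unfold pvPairsOf
  rw [List.filter_map]
  rw [List.map_map]
  rfl

-- A's token step written as a pair of grouping steps
def pvGroupStep (d : PySem.Dict Int (PySem.Set Int)) (kv : Int × Int) :
    PySem.Dict Int (PySem.Set Int) :=
  d.insert kv.1 (PySem.Set.add (d.getD kv.1 PySem.Set.empty) kv.2)

lemma pvInnerA_eq (toks : List String) (d1 d2 : PySem.Dict Int (PySem.Set Int)) :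
    (toks.map (fun s => (PySem.Str.split? s "-").getD [])).foldl pvStepA (d1, d2)
      = (((toks.filter pvTokOk).map pvTokPair).foldl pvGroupStep d1,
         (((toks.filter pvTokOk).map pvTokPair).map (fun zep => (zep.2, zep.1))).foldl pvGroupStep d2) := by
  induction toks generalizing d1 d2 with
  | nil => simp
  | cons t ts ih =>
    by_cases hc : ((PySem.Str.split? t "-").getD []).head?.getD "" = ""
    · have hok : pvTokOk t = false := by simp [pvTokOk, List.headD_eq_head?_getD, hc]
      have hst : pvStepA (d1, d2) ((PySem.Str.split? t "-").getD []) = (d1, d2) := by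
        simp [pvStepA, hc]
      simp only [List.map_cons, List.foldl_cons, List.filter_cons, hok]
      rw [hst]
      simpa using ih d1 d2
    · have hok : pvTokOk t = true := by simp [pvTokOk, List.headD_eq_head?_getD, hc]
      have hst : pvStepA (d1, d2) ((PySem.Str.split? t "-").getD [])
          = (pvGroupStep d1 (pvTokPair t), pvGroupStep d2 ((pvTokPair t).2, (pvTokPair t).1)) := by
        simp [pvStepA, pvGroupStep, pvTokPair, hc]
      simp only [List.map_cons, List.foldl_cons, List.filter_cons, hok]
      rw [hst]
      simpa using ih _ _

lemma pvLineA_degenerate (toks : List String)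
    (h : toks.map (fun s => (PySem.Str.split? s "-").getD []) = [[""]]) :
    (toks.filter pvTokOk) = [] := by
  rcases List.map_eq_singleton_iff.mp h with ⟨t, rfl, ht⟩
  simp [pvTokOk, ht]

-- lookup under A's grouping fold: the stored set grows by exactly the filtered values
lemma pvGetD_foldl_groupStep (pairs : List (Int × Int)) (d : PySem.Dict Int (PySem.Set Int)) (k : Int) :
    (pairs.foldl pvGroupStep d).getD k PySem.Set.empty
      = PySem.Set.update (d.getD k PySem.Set.empty)
          ((pairs.filter (fun kv => kv.1 == k)).map (fun kv => kv.2)) := by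
  induction pairs generalizing d with
  | nil => simp [PySem.Set.update_nil]
  | cons p ps ih =>
    simp only [List.foldl_cons, List.filter_cons]
    by_cases hk : p.1 = k
    · subst hk
      simp only [beq_self_eq_true, if_pos, List.map_cons]
      rw [ih, PySem.Set.update_cons]
      have : (pvGroupStep d p).getD p.1 PySem.Set.empty
          = PySem.Set.add (d.getD p.1 PySem.Set.empty) p.2 := by
        simp [pvGroupStep, PySem.Dict.getD_insert_self]
      rw [this]
    · have hbeq : (p.1 == k) = false := by simp [hk]
      simp only [hbeq, Bool.false_eq_true, if_false]
      rw [ih]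
      have : (pvGroupStep d p).getD k PySem.Set.empty = d.getD k PySem.Set.empty := by
        exact PySem.Dict.getD_insert_of_ne d _ _ (fun h => hk h.symm)
      rw [this]

-- A's per-line grouping fold, from the empty dict, IS B's grouped(pairs)
lemma pvItems_foldl_groupStep (pairs : List (Int × Int)) :
    (pairs.foldl pvGroupStep PySem.Dict.empty).items = pvGrouped pairs := by
  have hkeys : (pairs.foldl pvGroupStep PySem.Dict.empty).keys
      = PySem.Set.ofList (pairs.map (fun kv => kv.1)) := by
    have := PySem.Dict.keys_foldl_insert_key pairs
      (fun kv => kv.1)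
      (fun d kv => PySem.Set.add (d.getD kv.1 PySem.Set.empty) kv.2)
      PySem.Dict.empty
    simpa [pvGroupStep, PySem.Set.update_empty] using this
  have hnd : (pairs.foldl pvGroupStep PySem.Dict.empty).keys.Nodup := by
    rw [hkeys]; exact PySem.Set.nodup_ofList _
  rw [PySem.Dict.items_eq_map_keys _ hnd PySem.Set.empty, hkeys]
  unfold pvGrouped
  rw [PySem.List.dedup_eq_ofList]
  refine List.map_congr_left (fun k _ => ?_)
  rw [pvGetD_foldl_groupStep]
  have hempty : (PySem.Dict.empty : PySem.Dict Int (PySem.Set Int)).getD k PySem.Set.empty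
      = PySem.Set.empty := rfl
  rw [hempty]
  exact congrArg (fun t => (k, t)) (PySem.Set.update_nil_left _)

lemma pv_outer_foldl (ls : List (List (List String)))
    (a b : List (PySem.Dict Int (PySem.Set Int))) :
    ls.foldl
      (fun (acc : List (PySem.Dict Int (PySem.Set Int)) × List (PySem.Dict Int (PySem.Set Int))) l =>
        let zd := pvLineA l
        (acc.1 ++ [zd.2], acc.2 ++ [zd.1])) (a, b)
    = (a ++ ls.map (fun l => (pvLineA l).2), b ++ ls.map (fun l => (pvLineA l).1)) := by
  induction ls generalizing a b with
  | nil => simp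
  | cons l ls ih => simp [ih]

-- one line of A equals B's grouped of B's parsed pairs, in both directions
lemma pvLine_eq (s : String) :
    ((pvLineA ((((PySem.Str.split? (PySem.Str.strip s) " ").getD []).map
        (fun x => (PySem.Str.split? x "-").getD []))) ).1.items = pvGrouped (pvPairsOf s))
    ∧ ((pvLineA ((((PySem.Str.split? (PySem.Str.strip s) " ").getD []).map
        (fun x => (PySem.Str.split? x "-").getD []))) ).2.items
        = pvGrouped ((pvPairsOf s).map (fun ze => (ze.2, ze.1)))) := by
  set toks := (PySem.Str.split? (PySem.Str.strip s) " ").getD [] with htoks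
  rw [pvPairsOf_eq, ← htoks]
  unfold pvLineA
  by_cases hd : toks.map (fun x => (PySem.Str.split? x "-").getD []) = [[""]]
  · rw [if_neg (by simp [hd])]
    rw [pvLineA_degenerate toks hd]
    constructor <;> simp [pvGrouped] <;> rfl
  · rw [if_pos hd]
    rw [pvInnerA_eq]
    exact ⟨pvItems_foldl_groupStep _, pvItems_foldl_groupStep _⟩

set_option maxHeartbeats 1000000 in
theorem pv_main (aligns : List String) :
    aligns_to_dicts aligns = aligns_to_dicts_alt aligns := by
  simp only [aligns_to_dicts, aligns_to_dicts_alt]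
  rw [pv_outer_foldl]
  simp only [List.nil_append, List.map_map]
  refine Prod.ext ?_ ?_
  · refine List.map_congr_left (fun s _ => ?_)
    simp only [Function.comp]
    exact (pvLine_eq s).1
  · refine List.map_congr_left (fun s _ => ?_)
    simp only [Function.comp]
    exact (pvLine_eq s).2

-- ===== VERDICT (by name: the statement is the Claim_ definition above) =====
theorem aligns_to_dicts_spec : Claim_equal_aligns_to_dicts := by
  intro aligns _ _
  unfold Spec_aligns_to_dicts
  exact pv_main aligns
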